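-- pv_equiv track=rewrite | github.com/monetjoe/chest_falsetto | data.py | extract_melody
-- ===== SOURCE A (Python) =====
-- def extract_melody(abc):
--     lines = abc.split("\n")
--     melody = []
--
--     for line in lines:
--         if line.startswith("V:") or line.startswith("%%"):
--             if line == "V:2":
--                 break
--             continue
--         else:
--             melody.append(line)
--
--     return "\n".join(melody)
-- ===== SOURCE B (Python) =====
-- def extract_melody(abc):
--     lines = abc.split("\n")
--     if "V:2" in lines:
--         lines = lines[:lines.index("V:2")]
--     return "\n".join(l for l in lines if not (l.startswith("V:") or l.startswith("%%")))
-- ===== Notes on version B (the rewrite author's own statement) =====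
-- stated objective: simpler
-- what changed: Replaces A's single loop with an early break by a two-pass decomposition: first cut the line list at the first exact "V:2" line (if present) with index/slice, then keep non-header lines with one filter comprehension.
import Mathlib
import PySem

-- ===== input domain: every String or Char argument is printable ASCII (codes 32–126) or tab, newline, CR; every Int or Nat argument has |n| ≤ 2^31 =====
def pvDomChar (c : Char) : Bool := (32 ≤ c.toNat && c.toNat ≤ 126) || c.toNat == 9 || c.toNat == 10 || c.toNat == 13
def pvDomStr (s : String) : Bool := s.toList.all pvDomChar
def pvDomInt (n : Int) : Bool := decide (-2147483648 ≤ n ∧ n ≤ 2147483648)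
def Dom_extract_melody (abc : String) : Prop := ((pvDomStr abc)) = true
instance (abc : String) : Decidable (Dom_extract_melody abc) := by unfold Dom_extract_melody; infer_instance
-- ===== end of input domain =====

-- B replaces A's single loop with an early break by a cut-at-"V:2"-then-filter two-pass decomposition (objective: simpler).

-- ===== PORT A =====
-- the for-loop with continue/break, as structural recursion over the lines
def emA_loop : List String → List String
  | [] => []
  | l :: rest =>
    if PySem.Str.startswith l "V:" || PySem.Str.startswith l "%%" then
      if l == "V:2" then [] else emA_loop rest
    else l :: emA_loop rest

def extract_melody (abc : String) : String :=
  PySem.Str.join "\n" (emA_loop (((PySem.Str.split? abc "\n").getD [])))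

-- ===== PORT B =====
def emKeep (l : String) : Bool :=
  !(PySem.Str.startswith l "V:" || PySem.Str.startswith l "%%")

def extract_melody_alt (abc : String) : String :=
  let lines := ((PySem.Str.split? abc "\n").getD [])
  let cut := if lines.contains "V:2" then
      lines.take ((PySem.List.index? lines "V:2").getD 0)
    else lines
  PySem.Str.join "\n" (cut.filter emKeep)

-- ===== PRECONDITION & SPEC =====
def Spec_extract_melody (abc : String) (out : String) : Prop := out = extract_melody_alt abc
instance (abc : String) (out : String) : Decidable (Spec_extract_melody abc out) := by unfold Spec_extract_melody; infer_instance

-- ===== CLAIM (what is proved, stated in full; the proofs are below) =====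
def Claim_equal_extract_melody : Prop := ∀ (abc : String), Dom_extract_melody abc → Spec_extract_melody abc (extract_melody abc)

-- ===== LEMMAS AND PROOFS =====
theorem emA_loop_eq_cut_filter (ls : List String) :
    emA_loop ls =
      (if ls.contains "V:2" then ls.take ((PySem.List.index? ls "V:2").getD 0) else ls).filter emKeep := by
  induction ls with
  | nil => simp [emA_loop]
  | cons l rest ih =>
    by_cases hl : l = "V:2"
    · subst hl
      have hs : (PySem.Str.startswith "V:2" "V:" || PySem.Str.startswith "V:2" "%%") = true := by decide
      have hc : (("V:2" :: rest).contains "V:2") = true := by simp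
      rw [emA_loop, if_pos hs, if_pos (by decide : (("V:2" : String) == "V:2") = true),
        if_pos hc, PySem.List.index?_cons_self]
      simp only [Option.getD_some, List.take_zero, List.filter_nil]
    · have hl' : ¬ ("V:2" : String) = l := fun h => hl h.symm
      have hidx : PySem.List.index? (l :: rest) "V:2" = (PySem.List.index? rest "V:2").map (· + 1) :=
        PySem.List.index?_cons_of_ne rest hl
      have hcon : (l :: rest).contains "V:2" = rest.contains "V:2" := by
        simp [hl']
      -- the A-loop on a non-"V:2" head: skip or keep, no break
      have hA : emA_loop (l :: rest) =
          (if (PySem.Str.startswith l "V:" || PySem.Str.startswith l "%%") then emA_loop rest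
           else l :: emA_loop rest) := by
        rw [emA_loop]
        by_cases hs : (PySem.Str.startswith l "V:" || PySem.Str.startswith l "%%") = true
        · rw [if_pos hs, if_pos hs, if_neg (fun h => hl (by simpa using h))]
        · rw [if_neg hs, if_neg hs]
      -- the B-cut on a non-"V:2" head keeps the head
      have hcut : (if (l :: rest).contains "V:2" then
              (l :: rest).take ((PySem.List.index? (l :: rest) "V:2").getD 0) else l :: rest)
          = l :: (if rest.contains "V:2" then
              rest.take ((PySem.List.index? rest "V:2").getD 0) else rest) := by
        by_cases hm : rest.contains "V:2"
        · obtain ⟨i, hi⟩ : ∃ i, PySem.List.index? rest "V:2" = some i := by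
            rw [Option.isSome_iff_exists.symm, PySem.List.index?_isSome_iff]
            simpa using hm
          rw [hcon, if_pos hm, if_pos hm, hidx, hi]
          simp
        · rw [hcon, if_neg hm, if_neg hm]
      rw [hA, hcut, List.filter_cons, ih]
      by_cases hs : (PySem.Str.startswith l "V:" || PySem.Str.startswith l "%%") = true
      · rw [if_pos hs, if_neg (show ¬(emKeep l = true) by unfold emKeep; rw [hs]; decide)]
      · have hsf : (PySem.Str.startswith l "V:" || PySem.Str.startswith l "%%") = false := by
          revert hs; cases (PySem.Str.startswith l "V:" || PySem.Str.startswith l "%%") <;> simp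
        rw [if_neg hs, if_pos (show emKeep l = true by unfold emKeep; rw [hsf]; rfl)]

-- ===== VERDICT (by name: the statement is the Claim_ definition above) =====
theorem extract_melody_spec : Claim_equal_extract_melody := by
  intro abc _
  unfold Spec_extract_melody extract_melody extract_melody_alt
  rw [emA_loop_eq_cut_filter]
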